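-- pv_equiv track=rewrite | github.com/miku/pyflow | Snippets/Refactoring/issues.py | filter_by_a
-- ===== SOURCE A (Python) =====
-- def filter_by_a(records):
--     result = []
--     for record in records:
--         if 'a' in record:
--             for value in result:
--                 if 'a' in value:
--                     break
--             else:
--                 result.append(record)
--     return result
-- ===== SOURCE B (Python) =====
-- def filter_by_a(records):
--     for record in records:
--         if 'a' in record:
--             return [record]
--     return []
-- ===== Notes on version B (the rewrite author's own statement) =====
-- stated objective: simpler
-- what changed: Replaces the accumulator list and the inner for/else rescan with a single loop that returns the first record containing 'a' as a singleton immediately.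
import Mathlib
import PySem

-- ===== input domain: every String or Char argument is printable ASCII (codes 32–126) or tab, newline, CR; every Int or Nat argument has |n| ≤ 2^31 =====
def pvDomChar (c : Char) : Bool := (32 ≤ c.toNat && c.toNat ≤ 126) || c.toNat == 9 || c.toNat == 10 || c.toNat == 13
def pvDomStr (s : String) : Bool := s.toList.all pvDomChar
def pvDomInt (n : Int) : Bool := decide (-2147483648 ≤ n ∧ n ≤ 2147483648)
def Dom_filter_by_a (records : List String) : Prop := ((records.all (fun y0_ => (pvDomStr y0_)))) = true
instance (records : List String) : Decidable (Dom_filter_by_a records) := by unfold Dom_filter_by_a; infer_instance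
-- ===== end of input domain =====

-- B removes A's accumulator and inner for/else rescan: it returns the first record
-- containing 'a' as a singleton immediately (objective: simpler; same O(n) cost).

-- ===== PORT A =====
-- inner 'for value in result: if 'a' in value: break / else: append' — true iff some value contains 'a'
def pvInnerA : List String → Bool
  | [] => false
  | v :: vs => if PySem.Str.isIn "a" v then true else pvInnerA vs

def pvALoop (result : List String) : List String → List String
  | [] => result
  | r :: rest =>
    if PySem.Str.isIn "a" r then
      if pvInnerA result then pvALoop result rest
      else pvALoop (result ++ [r]) rest
    else pvALoop result rest

def filter_by_a (records : List String) : List String := pvALoop [] records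

-- ===== PORT B =====
def filter_by_a_alt : List String → List String
  | [] => []
  | r :: rest => if PySem.Str.isIn "a" r then [r] else filter_by_a_alt rest

-- ===== PRECONDITION & SPEC =====
def Spec_filter_by_a (records : List String) (out : List String) : Prop := out = filter_by_a_alt records
instance (records : List String) (out : List String) : Decidable (Spec_filter_by_a records out) := by unfold Spec_filter_by_a; infer_instance

-- ===== CLAIM (what is proved, stated in full; the proofs are below) =====
def Claim_equal_filter_by_a : Prop := ∀ (records : List String), Dom_filter_by_a records → Spec_filter_by_a records (filter_by_a records)

-- ===== LEMMAS AND PROOFS =====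
-- once the accumulator holds one record containing 'a', A's inner loop blocks every later append
lemma pvALoop_stop (r : String) (h : PySem.Chars.isIn ['a'] r.toList = true) :
    ∀ rest : List String, pvALoop [r] rest = [r] := by
  intro rest
  induction rest with
  | nil => rfl
  | cons x xs ih =>
    simp [pvALoop, pvInnerA, PySem.Str.isIn, h, ih]

lemma pvALoop_eq_alt (records : List String) : pvALoop [] records = filter_by_a_alt records := by
  induction records with
  | nil => rfl
  | cons r rest ih =>
    by_cases h : PySem.Chars.isIn ['a'] r.toList = true
    · simp [pvALoop, pvInnerA, PySem.Str.isIn, h, filter_by_a_alt, pvALoop_stop r h rest]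
    · simp [pvALoop, PySem.Str.isIn, filter_by_a_alt, h, ih]

-- ===== VERDICT (by name: the statement is the Claim_ definition above) =====
theorem filter_by_a_spec : Claim_equal_filter_by_a := by
  intro records _
  unfold Spec_filter_by_a filter_by_a
  exact pvALoop_eq_alt records
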